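-- pv_equiv track=rewrite | github.com/shanmugavelragavan/leetcode-practice | EASY/2094. Finding 3-Digit Even Numbers.py | findEvenNumbers
-- ===== SOURCE A (Python) =====
-- from typing import List
-- from itertools import permutations
--
-- def findEvenNumbers(digits: List[int]) -> List[int]:
--     # Get all possible 3-digit combinations
--     result = set()
--     for p in permutations(digits, 3):
--         # Skip if leading zero
--         if p[0] == 0:
--             continue
--         # Create number and check if even
--         num = p[0] * 100 + p[1] * 10 + p[2]
--         if num % 2 == 0:
--             result.add(num)
--
--     return sorted(list(result))
-- ===== SOURCE B (Python) =====
-- from typing import List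
-- from collections import Counter
--
-- def findEvenNumbers(digits: List[int]) -> List[int]:
--     # Count each digit value once, then enumerate ordered triples of DISTINCT
--     # values with multiplicity guards, instead of all index permutations.
--     cnt = Counter(digits)
--     keys = list(cnt)
--     result = set()
--     for a in keys:
--         if a == 0:
--             continue
--         for b in keys:
--             if cnt[b] < 1 + (b == a):
--                 continue
--             for c in keys:
--                 if cnt[c] < 1 + (c == a) + (c == b):
--                     continue
--                 num = a * 100 + b * 10 + c
--                 if num % 2 == 0:
--                     result.add(num)
--     return sorted(result)
-- ===== Notes on version B (the rewrite author's own statement) =====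
-- stated objective: alternative
-- what changed: A enumerates all ordered index permutations of length 3; B builds a Counter once and enumerates ordered triples of DISTINCT digit values with multiplicity guards, so its cubic loop runs over the number of distinct values rather than over all index triples.
import Mathlib
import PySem

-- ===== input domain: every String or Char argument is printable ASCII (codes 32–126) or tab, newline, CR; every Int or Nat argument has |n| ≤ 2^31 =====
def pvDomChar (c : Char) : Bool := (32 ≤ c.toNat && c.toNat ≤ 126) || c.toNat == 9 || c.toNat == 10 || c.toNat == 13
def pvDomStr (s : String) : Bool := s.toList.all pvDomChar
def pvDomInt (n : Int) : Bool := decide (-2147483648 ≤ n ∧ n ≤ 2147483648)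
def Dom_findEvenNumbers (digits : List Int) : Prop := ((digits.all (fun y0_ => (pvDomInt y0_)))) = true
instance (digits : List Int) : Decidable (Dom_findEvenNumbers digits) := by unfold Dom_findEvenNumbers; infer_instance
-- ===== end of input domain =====

-- B replaces A's scan of all ordered index permutations by a frequency count plus a scan over
-- ordered triples of distinct digit VALUES with multiplicity guards (objective: alternative algorithm).


-- ===== PORT A =====
-- for p in permutations(digits, 3): skip a leading zero, keep the even numbers in a set, return sorted.
-- p[0]/p[1]/p[2] are ported with the total pyGetD: every member of `permutations digits 3` has
-- length 3, so Python's tuple indexing never raises here and pyGetD is exact.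
def findEvenNumbers (digits : List Int) : List Int :=
  let result : PySem.Set Int :=
    (PySem.List.permutations digits 3).foldl (fun result p =>
      if PySem.List.pyGetD p 0 0 = 0 then result
      else
        let num := PySem.List.pyGetD p 0 0 * 100 + PySem.List.pyGetD p 1 0 * 10 +
          PySem.List.pyGetD p 2 0
        if PySem.Int.mod num 2 = 0 then PySem.Set.add result num else result)
      PySem.Set.empty
  PySem.List.sorted result (fun x => x) false

-- ===== PORT B =====
-- cnt = Counter(digits); keys = list(cnt); triple loop over distinct values with multiplicity guards.
def findEvenNumbers_alt (digits : List Int) : List Int :=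
  let cnt := PySem.Dict.counter digits
  let keys := cnt.keys
  let result : PySem.Set Int :=
    keys.foldl (fun result a =>
      if a = 0 then result
      else
        keys.foldl (fun result b =>
          if cnt.getD b 0 < 1 + (if b = a then 1 else 0) then result
          else
            keys.foldl (fun result c =>
              if cnt.getD c 0 < 1 + (if c = a then 1 else 0) + (if c = b then 1 else 0) then
                result
              else
                let num := a * 100 + b * 10 + c
                if PySem.Int.mod num 2 = 0 then PySem.Set.add result num else result)
              result)
          result)
      PySem.Set.empty
  PySem.List.sorted result (fun x => x) false

-- ===== PRECONDITION & SPEC =====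
def Spec_findEvenNumbers (digits : List Int) (out : List Int) : Prop := out = findEvenNumbers_alt digits
instance (digits : List Int) (out : List Int) : Decidable (Spec_findEvenNumbers digits out) := by unfold Spec_findEvenNumbers; infer_instance

-- ===== CLAIM (what is proved, stated in full; the proofs are below) =====
def Claim_equal_findEvenNumbers : Prop := ∀ (digits : List Int), Dom_findEvenNumbers digits → Spec_findEvenNumbers digits (findEvenNumbers digits)

-- ===== LEMMAS AND PROOFS =====

-- membership through a fold whose step either keeps the accumulator or appends to it
theorem mem_foldl_step {α β : Type} (step : List β → α → List β) (Q : α → β → Prop)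
    (h : ∀ s x y, y ∈ step s x ↔ y ∈ s ∨ Q x y) :
    ∀ (l : List α) (s : List β) (y : β), y ∈ l.foldl step s ↔ y ∈ s ∨ ∃ x ∈ l, Q x y := by
  intro l
  induction l with
  | nil => simp
  | cons x t ih =>
    intro s y
    simp only [List.foldl_cons, ih, h, List.mem_cons]
    constructor
    · rintro ((hs | hq) | ⟨z, hz, hQ⟩)
      · exact Or.inl hs
      · exact Or.inr ⟨x, Or.inl rfl, hq⟩
      · exact Or.inr ⟨z, Or.inr hz, hQ⟩
    · rintro (hs | ⟨z, (rfl | hz), hQ⟩)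
      · exact Or.inl (Or.inl hs)
      · exact Or.inl (Or.inr hQ)
      · exact Or.inr ⟨z, hz, hQ⟩

theorem nodup_foldl_step {α β : Type} (step : List β → α → List β)
    (h : ∀ s x, s.Nodup → (step s x).Nodup) :
    ∀ (l : List α) (s : List β), s.Nodup → (l.foldl step s).Nodup := by
  intro l
  induction l with
  | nil => simp
  | cons x t ih => intro s hs; exact ih _ (h s x hs)

-- a sublist-permutation of xs of length r is a member of permutations xs r
theorem mem_permutations_of_subperm {xs l : List Int} (h : List.Subperm l xs) :
    l ∈ PySem.List.permutations xs l.length := by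
  induction l generalizing xs with
  | nil => simp
  | cons a t ih =>
    have ha : a ∈ xs := h.subset (List.mem_cons_self)
    have ht : List.Subperm t (xs.erase a) := by
      rw [List.subperm_ext_iff] at h ⊢
      intro x hx
      have hcx := h x (List.mem_cons_of_mem a hx)
      rw [List.count_erase]
      simp only [List.count_cons, beq_iff_eq] at hcx ⊢
      split_ifs at hcx ⊢ <;> omega
    have hidx : xs[xs.idxOf a]? = some a := List.getElem?_idxOf ha
    have herase : xs.eraseIdx (xs.idxOf a) = xs.erase a := List.eraseIdx_idxOf_eq_erase a xs
    have hlt : xs.idxOf a < xs.length := List.idxOf_lt_length_of_mem ha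
    show a :: t ∈ PySem.List.permutations xs (t.length + 1)
    simp only [PySem.List.permutations, List.mem_flatMap, List.mem_range]
    exact ⟨xs.idxOf a, hlt, by
      rw [hidx]
      simp only [List.mem_map]
      exact ⟨t, by rw [herase]; exact ih ht, rfl⟩⟩

-- members of permutations xs 3 are exactly the length-3 sublist-permutations
theorem mem_permutations_three {xs p : List Int} :
    p ∈ PySem.List.permutations xs 3 ↔ ∃ a b c, p = [a, b, c] ∧ List.Subperm [a, b, c] xs := by
  constructor
  · intro hp
    obtain ⟨hlen, rest, hperm⟩ := PySem.List.exists_perm_of_mem_permutations 3 xs p hp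
    match p, hlen with
    | [a, b, c], _ =>
      exact ⟨a, b, c, rfl, ((List.sublist_append_left _ _).subperm).trans hperm.subperm⟩
  · rintro ⟨a, b, c, rfl, hsub⟩
    exact mem_permutations_of_subperm hsub

-- counts of the literal triple [a, b, c]: subperm ↔ B's multiplicity guards
theorem subperm_triple_iff (a b c : Int) (xs : List Int) :
    List.Subperm [a, b, c] xs ↔
      ((1:Int) ≤ (xs.count a : Int) ∧ (1 + (if b = a then 1 else 0) : Int) ≤ (xs.count b : Int) ∧
        (1 + (if c = a then 1 else 0) + (if c = b then 1 else 0) : Int) ≤ (xs.count c : Int)) := by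
  rw [List.subperm_ext_iff]
  simp only [List.mem_cons, List.not_mem_nil, or_false, forall_eq_or_imp, forall_eq,
    List.count_cons, List.count_nil, beq_iff_eq]
  by_cases hba : b = a <;> by_cases hca : c = a <;> by_cases hcb : c = b <;>
    simp only [hba, hca, hcb, if_true, if_false] <;> (try split_ifs) <;> push_cast <;> omega

-- the set A builds: membership characterisation
theorem mem_resultA (digits : List Int) (y : Int) :
    y ∈ (PySem.List.permutations digits 3).foldl (fun result p =>
      if PySem.List.pyGetD p 0 0 = 0 then result
      else
        let num := PySem.List.pyGetD p 0 0 * 100 + PySem.List.pyGetD p 1 0 * 10 +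
          PySem.List.pyGetD p 2 0
        if PySem.Int.mod num 2 = 0 then PySem.Set.add result num else result)
      PySem.Set.empty ↔
    ∃ a b c, List.Subperm [a, b, c] digits ∧ ¬a = 0 ∧
      PySem.Int.mod (a * 100 + b * 10 + c) 2 = 0 ∧ y = a * 100 + b * 10 + c := by
  rw [mem_foldl_step _ (fun p y => ¬PySem.List.pyGetD p 0 0 = 0 ∧
      PySem.Int.mod (PySem.List.pyGetD p 0 0 * 100 + PySem.List.pyGetD p 1 0 * 10 +
        PySem.List.pyGetD p 2 0) 2 = 0 ∧
      y = PySem.List.pyGetD p 0 0 * 100 + PySem.List.pyGetD p 1 0 * 10 + PySem.List.pyGetD p 2 0)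
    ?_]
  · simp only [PySem.Set.empty, List.not_mem_nil, false_or]
    constructor
    · rintro ⟨p, hp, hne, heven, rfl⟩
      obtain ⟨a, b, c, rfl, hsub⟩ := mem_permutations_three.mp hp
      exact ⟨a, b, c, hsub, hne, heven, rfl⟩
    · rintro ⟨a, b, c, hsub, hne, heven, rfl⟩
      exact ⟨[a, b, c], mem_permutations_three.mpr ⟨a, b, c, rfl, hsub⟩, hne, heven, rfl⟩
  · intro s x y
    by_cases h1 : PySem.List.pyGetD x 0 0 = 0
    · rw [if_pos h1]
      exact ⟨Or.inl, by rintro (hy | ⟨hne, -⟩); exacts [hy, absurd h1 hne]⟩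
    · rw [if_neg h1]
      show y ∈ (if PySem.Int.mod (PySem.List.pyGetD x 0 0 * 100 +
          PySem.List.pyGetD x 1 0 * 10 + PySem.List.pyGetD x 2 0) 2 = 0 then
        PySem.Set.add s (PySem.List.pyGetD x 0 0 * 100 + PySem.List.pyGetD x 1 0 * 10 +
          PySem.List.pyGetD x 2 0) else s) ↔ _
      by_cases h2 : PySem.Int.mod (PySem.List.pyGetD x 0 0 * 100 +
          PySem.List.pyGetD x 1 0 * 10 + PySem.List.pyGetD x 2 0) 2 = 0
      · rw [if_pos h2]
        simp only [PySem.Set.mem_add]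
        exact ⟨by rintro (hy | rfl); exacts [Or.inl hy, Or.inr ⟨h1, h2, rfl⟩],
          by rintro (hy | ⟨-, -, rfl⟩); exacts [Or.inl hy, Or.inr rfl]⟩
      · rw [if_neg h2]
        exact ⟨Or.inl, by rintro (hy | ⟨-, heven, -⟩); exacts [hy, absurd heven h2]⟩

-- the set B builds: the same membership characterisation
theorem mem_resultB (digits : List Int) (y : Int) :
    y ∈ (PySem.Dict.counter digits).keys.foldl (fun result a =>
      if a = 0 then result
      else
        (PySem.Dict.counter digits).keys.foldl (fun result b =>
          if (PySem.Dict.counter digits).getD b 0 < 1 + (if b = a then 1 else 0) then result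
          else
            (PySem.Dict.counter digits).keys.foldl (fun result c =>
              if (PySem.Dict.counter digits).getD c 0 <
                  1 + (if c = a then 1 else 0) + (if c = b then 1 else 0) then
                result
              else
                let num := a * 100 + b * 10 + c
                if PySem.Int.mod num 2 = 0 then PySem.Set.add result num else result)
              result)
          result)
      PySem.Set.empty ↔
    ∃ a b c, List.Subperm [a, b, c] digits ∧ ¬a = 0 ∧
      PySem.Int.mod (a * 100 + b * 10 + c) 2 = 0 ∧ y = a * 100 + b * 10 + c := by
  rw [mem_foldl_step _ (fun a y => ¬a = 0 ∧
      ∃ b ∈ (PySem.Dict.counter digits).keys,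
        ¬((PySem.Dict.counter digits).getD b 0 < 1 + (if b = a then 1 else 0)) ∧
        ∃ c ∈ (PySem.Dict.counter digits).keys,
          ¬((PySem.Dict.counter digits).getD c 0 <
              1 + (if c = a then 1 else 0) + (if c = b then 1 else 0)) ∧
          PySem.Int.mod (a * 100 + b * 10 + c) 2 = 0 ∧ y = a * 100 + b * 10 + c) ?_]
  · simp only [PySem.Set.empty, List.not_mem_nil, false_or, PySem.Dict.keys_counter,
      PySem.Set.mem_ofList, PySem.Dict.getD_counter, not_lt]
    constructor
    · rintro ⟨a, ha, h0, b, -, hb2, c, -, hc2, heven, rfl⟩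
      refine ⟨a, b, c, (subperm_triple_iff a b c digits).mpr ⟨?_, hb2, hc2⟩, h0, heven, rfl⟩
      exact_mod_cast List.count_pos_iff.mpr ha
    · rintro ⟨a, b, c, hsub, h0, heven, rfl⟩
      obtain ⟨h1, h2, h3⟩ := (subperm_triple_iff a b c digits).mp hsub
      have hb : b ∈ digits := List.count_pos_iff.mp (by split_ifs at h2 <;> omega)
      have hc : c ∈ digits := List.count_pos_iff.mp (by split_ifs at h3 <;> omega)
      exact ⟨a, List.count_pos_iff.mp (by omega), h0, b, hb, h2, c, hc, h3, heven, rfl⟩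
  · intro s a y
    by_cases h1 : a = 0
    · rw [if_pos h1]
      exact ⟨Or.inl, by rintro (hy | ⟨hne, -⟩); exacts [hy, absurd h1 hne]⟩
    · rw [if_neg h1, mem_foldl_step _ (fun b y =>
          ¬((PySem.Dict.counter digits).getD b 0 < 1 + (if b = a then 1 else 0)) ∧
          ∃ c ∈ (PySem.Dict.counter digits).keys,
            ¬((PySem.Dict.counter digits).getD c 0 <
                1 + (if c = a then 1 else 0) + (if c = b then 1 else 0)) ∧
            PySem.Int.mod (a * 100 + b * 10 + c) 2 = 0 ∧ y = a * 100 + b * 10 + c) ?_]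
      · exact ⟨by rintro (hy | hex); exacts [Or.inl hy, Or.inr ⟨h1, hex⟩],
          by rintro (hy | ⟨-, hex⟩); exacts [Or.inl hy, Or.inr hex]⟩
      · intro s b y
        by_cases h2 : (PySem.Dict.counter digits).getD b 0 < 1 + (if b = a then 1 else 0)
        · rw [if_pos h2]
          exact ⟨Or.inl, by rintro (hy | ⟨hc, -⟩); exacts [hy, absurd h2 hc]⟩
        · rw [if_neg h2, mem_foldl_step _ (fun c y =>
              ¬((PySem.Dict.counter digits).getD c 0 <
                  1 + (if c = a then 1 else 0) + (if c = b then 1 else 0)) ∧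
              PySem.Int.mod (a * 100 + b * 10 + c) 2 = 0 ∧ y = a * 100 + b * 10 + c) ?_]
          · exact ⟨by rintro (hy | hex); exacts [Or.inl hy, Or.inr ⟨h2, hex⟩],
              by rintro (hy | ⟨-, hex⟩); exacts [Or.inl hy, Or.inr hex]⟩
          · intro s c y
            by_cases h3 : (PySem.Dict.counter digits).getD c 0 <
                1 + (if c = a then 1 else 0) + (if c = b then 1 else 0)
            · rw [if_pos h3]
              exact ⟨Or.inl, by rintro (hy | ⟨hc, -⟩); exacts [hy, absurd h3 hc]⟩
            · rw [if_neg h3]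
              show y ∈ (if PySem.Int.mod (a * 100 + b * 10 + c) 2 = 0 then
                PySem.Set.add s (a * 100 + b * 10 + c) else s) ↔ _
              by_cases h4 : PySem.Int.mod (a * 100 + b * 10 + c) 2 = 0
              · rw [if_pos h4]
                simp only [PySem.Set.mem_add]
                exact ⟨by rintro (hy | rfl); exacts [Or.inl hy, Or.inr ⟨h3, h4, rfl⟩],
                  by rintro (hy | ⟨-, -, rfl⟩); exacts [Or.inl hy, Or.inr rfl]⟩
              · rw [if_neg h4]
                exact ⟨Or.inl, by rintro (hy | ⟨-, heven, -⟩); exacts [hy, absurd heven h4]⟩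

theorem nodup_resultA (digits : List Int) :
    ((PySem.List.permutations digits 3).foldl (fun result p =>
      if PySem.List.pyGetD p 0 0 = 0 then result
      else
        let num := PySem.List.pyGetD p 0 0 * 100 + PySem.List.pyGetD p 1 0 * 10 +
          PySem.List.pyGetD p 2 0
        if PySem.Int.mod num 2 = 0 then PySem.Set.add result num else result)
      PySem.Set.empty : List Int).Nodup := by
  refine nodup_foldl_step _ ?_ _ _ List.nodup_nil
  intro s x hs
  by_cases h1 : PySem.List.pyGetD x 0 0 = 0
  · rw [if_pos h1]; exact hs
  · rw [if_neg h1]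
    show (if PySem.Int.mod (PySem.List.pyGetD x 0 0 * 100 + PySem.List.pyGetD x 1 0 * 10 +
        PySem.List.pyGetD x 2 0) 2 = 0 then
      PySem.Set.add s (PySem.List.pyGetD x 0 0 * 100 + PySem.List.pyGetD x 1 0 * 10 +
        PySem.List.pyGetD x 2 0) else s).Nodup
    split_ifs
    · exact PySem.Set.nodup_add _ _ hs
    · exact hs

theorem nodup_resultB (digits : List Int) :
    ((PySem.Dict.counter digits).keys.foldl (fun result a =>
      if a = 0 then result
      else
        (PySem.Dict.counter digits).keys.foldl (fun result b =>
          if (PySem.Dict.counter digits).getD b 0 < 1 + (if b = a then 1 else 0) then result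
          else
            (PySem.Dict.counter digits).keys.foldl (fun result c =>
              if (PySem.Dict.counter digits).getD c 0 <
                  1 + (if c = a then 1 else 0) + (if c = b then 1 else 0) then
                result
              else
                let num := a * 100 + b * 10 + c
                if PySem.Int.mod num 2 = 0 then PySem.Set.add result num else result)
              result)
          result)
      PySem.Set.empty : List Int).Nodup := by
  refine nodup_foldl_step _ ?_ _ _ List.nodup_nil
  intro s a hs
  by_cases h1 : a = 0
  · rw [if_pos h1]; exact hs
  · rw [if_neg h1]
    refine nodup_foldl_step _ ?_ _ _ hs
    intro s b hsb
    by_cases h2 : (PySem.Dict.counter digits).getD b 0 < 1 + (if b = a then 1 else 0)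
    · rw [if_pos h2]; exact hsb
    · rw [if_neg h2]
      refine nodup_foldl_step _ ?_ _ _ hsb
      intro s c hsc
      by_cases h3 : (PySem.Dict.counter digits).getD c 0 <
          1 + (if c = a then 1 else 0) + (if c = b then 1 else 0)
      · rw [if_pos h3]; exact hsc
      · rw [if_neg h3]
        show (if PySem.Int.mod (a * 100 + b * 10 + c) 2 = 0 then
          PySem.Set.add s (a * 100 + b * 10 + c) else s).Nodup
        split_ifs
        · exact PySem.Set.nodup_add _ _ hsc
        · exact hsc

-- ===== VERDICT (by name: the statement is the Claim_ definition above) =====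
theorem findEvenNumbers_spec : Claim_equal_findEvenNumbers := by
  intro digits _
  unfold Spec_findEvenNumbers findEvenNumbers findEvenNumbers_alt
  apply PySem.List.sorted_eq_sorted_of_perm _ _ _ (fun x y h => h)
  apply (List.perm_ext_iff_of_nodup (nodup_resultA digits) (nodup_resultB digits)).mpr
  intro y
  rw [mem_resultA digits y, ← mem_resultB digits y]
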